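-- pv_equiv track=rewrite | github.com/WWWonderer/activity_logger | new_logger/sanitization/url_sanitizer.py | _looks_like_compact_secret
-- ===== SOURCE A (Python) =====
-- COMPACT_SECRET_MIN_LEN = 48
--
-- def _looks_like_compact_secret(val: str) -> bool:
--     if len(val) < COMPACT_SECRET_MIN_LEN:
--         return False
--     if any(ch.isspace() for ch in val):
--         return False
--
--     classes = 0
--     if any(ch.islower() for ch in val):
--         classes += 1
--     if any(ch.isupper() for ch in val):
--         classes += 1
--     if any(ch.isdigit() for ch in val):
--         classes += 1
--     if any(not ch.isalnum() for ch in val):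
--         classes += 1
--
--     # Long compact values with mixed classes are commonly secrets/tokens.
--     return classes >= 3
-- ===== SOURCE B (Python) =====
-- COMPACT_SECRET_MIN_LEN = 48
--
-- def _category(ch):
--     # map a character to its class tag; alnum chars outside the four classes get no tag
--     if ch.isspace():
--         return 0
--     if ch.islower():
--         return 1
--     if ch.isupper():
--         return 2
--     if ch.isdigit():
--         return 3
--     if not ch.isalnum():
--         return 4
--     return None
--
-- def _looks_like_compact_secret(val: str) -> bool:
--     if len(val) < COMPACT_SECRET_MIN_LEN:
--         return False
--     cats = {c for c in map(_category, val) if c is not None}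
--     return 0 not in cats and len(cats) >= 3
-- ===== Notes on version B (the rewrite author's own statement) =====
-- stated objective: faster
-- what changed: B maps every character once to a category tag (space/lower/upper/digit/other), collects the distinct tags in a set, and decides from set membership (no space tag) and set cardinality (>= 3), instead of A's six separate any() scans feeding a class counter.
import Mathlib
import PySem

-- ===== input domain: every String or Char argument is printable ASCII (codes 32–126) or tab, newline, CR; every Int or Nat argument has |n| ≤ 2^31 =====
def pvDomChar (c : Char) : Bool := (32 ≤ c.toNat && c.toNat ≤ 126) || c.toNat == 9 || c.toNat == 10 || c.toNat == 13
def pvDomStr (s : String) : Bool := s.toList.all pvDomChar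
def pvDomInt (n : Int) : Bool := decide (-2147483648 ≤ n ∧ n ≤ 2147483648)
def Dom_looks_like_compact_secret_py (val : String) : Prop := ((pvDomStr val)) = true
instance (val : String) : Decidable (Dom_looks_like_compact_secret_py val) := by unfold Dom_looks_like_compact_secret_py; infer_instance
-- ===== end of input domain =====

-- B classifies each character into a category tag once, collects the distinct tags in a set,
-- and decides from that set's membership and cardinality; same return value as A.

-- ===== PORT A =====
def looks_like_compact_secret_py (val : String) : Bool :=
  if PySem.Str.len val < 48 then false
  else if val.toList.any PySem.Chars.isspace then false
  else
    let classes : Int := 0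
    let classes := if val.toList.any PySem.Chars.islower then classes + 1 else classes
    let classes := if val.toList.any PySem.Chars.isupper then classes + 1 else classes
    let classes := if val.toList.any PySem.Chars.isdigit then classes + 1 else classes
    let classes := if val.toList.any (fun ch => !PySem.Chars.isalnum ch) then classes + 1 else classes
    decide (classes ≥ 3)

-- ===== PORT B =====
-- _category: the class tag of one character (none for an alnum char in no class)
def pvCategory (ch : Char) : Option Nat :=
  if PySem.Chars.isspace ch then some 0
  else if PySem.Chars.islower ch then some 1
  else if PySem.Chars.isupper ch then some 2
  else if PySem.Chars.isdigit ch then some 3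
  else if !PySem.Chars.isalnum ch then some 4
  else none

def looks_like_compact_secret_py_alt (val : String) : Bool :=
  if PySem.Str.len val < 48 then false
  else
    let cats : PySem.Set Nat := PySem.Set.ofList (val.toList.filterMap pvCategory)
    !(PySem.Set.contains cats 0) && decide (3 ≤ PySem.Set.len cats)

-- ===== PRECONDITION & SPEC =====
def Spec_looks_like_compact_secret_py (val : String) (out : Bool) : Prop := out = looks_like_compact_secret_py_alt val
instance (val : String) (out : Bool) : Decidable (Spec_looks_like_compact_secret_py val out) := by unfold Spec_looks_like_compact_secret_py; infer_instance

-- ===== CLAIM (what is proved, stated in full; the proofs are below) =====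
def Claim_equal_looks_like_compact_secret_py : Prop := ∀ (val : String), Dom_looks_like_compact_secret_py val → Spec_looks_like_compact_secret_py val (looks_like_compact_secret_py val)

-- ===== LEMMAS AND PROOFS =====

-- character-class disjointness (ASCII code ranges)
theorem pv_lower_not_upper (ch : Char) (h : PySem.Chars.islower ch = true) :
    PySem.Chars.isupper ch = false := by
  simp only [PySem.Chars.isupper, PySem.Chars.islower, Bool.and_eq_true, decide_eq_true_eq,
    Char.le_def, UInt32.le_iff_toNat_le, Bool.and_eq_false_iff, decide_eq_false_iff_not, not_le] at *
  have e1 : ('A').val.toNat = 65 := by decide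
  have e2 : ('Z').val.toNat = 90 := by decide
  have e3 : ('a').val.toNat = 97 := by decide
  omega

theorem pv_lower_not_digit (ch : Char) (h : PySem.Chars.islower ch = true) :
    PySem.Chars.isdigit ch = false := by
  simp only [PySem.Chars.islower, PySem.Chars.isdigit, Bool.and_eq_true, decide_eq_true_eq,
    Char.le_def, UInt32.le_iff_toNat_le, Bool.and_eq_false_iff, decide_eq_false_iff_not, not_le] at *
  have e1 : ('a').val.toNat = 97 := by decide
  have e2 : ('9').val.toNat = 57 := by decide
  omega

theorem pv_upper_not_digit (ch : Char) (h : PySem.Chars.isupper ch = true) :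
    PySem.Chars.isdigit ch = false := by
  simp only [PySem.Chars.isupper, PySem.Chars.isdigit, Bool.and_eq_true, decide_eq_true_eq,
    Char.le_def, UInt32.le_iff_toNat_le, Bool.and_eq_false_iff, decide_eq_false_iff_not, not_le] at *
  have e1 : ('A').val.toNat = 65 := by decide
  have e2 : ('9').val.toNat = 57 := by decide
  omega

-- characterisations of pvCategory
theorem pvCategory_eq_zero (ch : Char) :
    pvCategory ch = some 0 ↔ PySem.Chars.isspace ch = true := by
  unfold pvCategory; split_ifs <;> simp_all

theorem pvCategory_eq_one (ch : Char) :
    pvCategory ch = some 1 ↔ (PySem.Chars.isspace ch = false ∧ PySem.Chars.islower ch = true) := by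
  unfold pvCategory; split_ifs <;> simp_all

theorem pvCategory_eq_two (ch : Char) :
    pvCategory ch = some 2 ↔
      (PySem.Chars.isspace ch = false ∧ PySem.Chars.isupper ch = true) := by
  unfold pvCategory; split_ifs with h1 h2 h3 <;>
    simp_all [pv_lower_not_upper]

theorem pvCategory_eq_three (ch : Char) :
    pvCategory ch = some 3 ↔
      (PySem.Chars.isspace ch = false ∧ PySem.Chars.isdigit ch = true) := by
  unfold pvCategory; split_ifs with h1 h2 h3 h4 <;>
    simp_all [pv_lower_not_digit, pv_upper_not_digit]

theorem pvCategory_eq_four (ch : Char) :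
    pvCategory ch = some 4 ↔
      (PySem.Chars.isspace ch = false ∧ PySem.Chars.isalnum ch = false) := by
  unfold pvCategory
  simp only [PySem.Chars.isalnum, PySem.Chars.isalpha]
  split_ifs <;> simp_all

-- membership in the category list
theorem pv_mem_zero (cs : List Char) :
    (0 ∈ cs.filterMap pvCategory) ↔ cs.any PySem.Chars.isspace = true := by
  simp only [List.mem_filterMap, List.any_eq_true, pvCategory_eq_zero]

theorem pv_mem_one (cs : List Char) (hns : cs.any PySem.Chars.isspace = false) :
    (1 ∈ cs.filterMap pvCategory) ↔ cs.any PySem.Chars.islower = true := by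
  simp only [List.any_eq_false] at hns
  simp only [List.mem_filterMap, List.any_eq_true, pvCategory_eq_one]
  exact ⟨fun ⟨c, hc, _, h⟩ => ⟨c, hc, h⟩, fun ⟨c, hc, h⟩ => ⟨c, hc, by simpa using hns c hc, h⟩⟩

theorem pv_mem_two (cs : List Char) (hns : cs.any PySem.Chars.isspace = false) :
    (2 ∈ cs.filterMap pvCategory) ↔ cs.any PySem.Chars.isupper = true := by
  simp only [List.any_eq_false] at hns
  simp only [List.mem_filterMap, List.any_eq_true, pvCategory_eq_two]
  exact ⟨fun ⟨c, hc, _, h⟩ => ⟨c, hc, h⟩, fun ⟨c, hc, h⟩ => ⟨c, hc, by simpa using hns c hc, h⟩⟩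

theorem pv_mem_three (cs : List Char) (hns : cs.any PySem.Chars.isspace = false) :
    (3 ∈ cs.filterMap pvCategory) ↔ cs.any PySem.Chars.isdigit = true := by
  simp only [List.any_eq_false] at hns
  simp only [List.mem_filterMap, List.any_eq_true, pvCategory_eq_three]
  exact ⟨fun ⟨c, hc, _, h⟩ => ⟨c, hc, h⟩, fun ⟨c, hc, h⟩ => ⟨c, hc, by simpa using hns c hc, h⟩⟩

theorem pv_mem_four (cs : List Char) (hns : cs.any PySem.Chars.isspace = false) :
    (4 ∈ cs.filterMap pvCategory) ↔ cs.any (fun ch => !PySem.Chars.isalnum ch) = true := by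
  simp only [List.any_eq_false] at hns
  simp only [List.mem_filterMap, List.any_eq_true, pvCategory_eq_four, Bool.not_eq_true']
  exact ⟨fun ⟨c, hc, _, h⟩ => ⟨c, hc, h⟩, fun ⟨c, hc, h⟩ => ⟨c, hc, by simpa using hns c hc, h⟩⟩

-- every category is one of 0..4
theorem pv_cat_range (cs : List Char) (x : Nat) (hx : x ∈ cs.filterMap pvCategory) :
    x = 0 ∨ x = 1 ∨ x = 2 ∨ x = 3 ∨ x = 4 := by
  simp only [List.mem_filterMap] at hx
  obtain ⟨c, _, hc⟩ := hx
  unfold pvCategory at hc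
  split_ifs at hc <;> simp_all

-- a nodup list of tags in {1,2,3,4}: its length is the number of present tags
theorem pv_len_eq (l : List Nat) (hn : l.Nodup)
    (hs : ∀ x ∈ l, x = 1 ∨ x = 2 ∨ x = 3 ∨ x = 4) :
    l.length = (if 1 ∈ l then 1 else 0) + (if 2 ∈ l then 1 else 0)
      + (if 3 ∈ l then 1 else 0) + (if 4 ∈ l then 1 else 0) := by
  have hperm : l.Perm (([1, 2, 3, 4] : List Nat).filter (fun x => decide (x ∈ l))) := by
    rw [List.perm_ext_iff_of_nodup hn (List.Nodup.filter _ (by decide))]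
    intro a
    simp only [List.mem_filter, decide_eq_true_eq]
    constructor
    · intro ha; exact ⟨by rcases hs a ha with h | h | h | h <;> simp [h], ha⟩
    · exact fun h => h.2
  rw [hperm.length_eq]
  by_cases h1 : 1 ∈ l <;> by_cases h2 : 2 ∈ l <;> by_cases h3 : 3 ∈ l <;> by_cases h4 : 4 ∈ l <;>
    simp [List.filter, h1, h2, h3, h4]

-- ===== VERDICT (by name: the statement is the Claim_ definition above) =====
theorem looks_like_compact_secret_py_spec : Claim_equal_looks_like_compact_secret_py := by
  intro val _
  unfold Spec_looks_like_compact_secret_py looks_like_compact_secret_py looks_like_compact_secret_py_alt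
  by_cases hlen : PySem.Str.len val < 48
  · rw [if_pos hlen, if_pos hlen]
  · rw [if_neg hlen, if_neg hlen]
    set cs := val.toList with hcs
    have h0 : (PySem.Set.contains (PySem.Set.ofList (cs.filterMap pvCategory)) 0 = true)
        ↔ cs.any PySem.Chars.isspace = true := by
      rw [PySem.Set.contains_iff, PySem.Set.mem_ofList, pv_mem_zero]
    by_cases hsp : cs.any PySem.Chars.isspace = true
    · rw [if_pos hsp]
      show false = ((!(PySem.Set.contains (PySem.Set.ofList (cs.filterMap pvCategory)) 0))
        && decide (3 ≤ PySem.Set.len (PySem.Set.ofList (cs.filterMap pvCategory))))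
      rw [h0.mpr hsp]
      simp only [Bool.not_true, Bool.false_and]
    · have hns : cs.any PySem.Chars.isspace = false := by simpa using hsp
      rw [if_neg hsp]
      have hc : PySem.Set.contains (PySem.Set.ofList (cs.filterMap pvCategory)) 0 = false := by
        rw [Bool.eq_false_iff]; intro h; exact hsp (h0.mp h)
      show _ = ((!(PySem.Set.contains (PySem.Set.ofList (cs.filterMap pvCategory)) 0))
        && decide (3 ≤ PySem.Set.len (PySem.Set.ofList (cs.filterMap pvCategory))))
      rw [hc]
      simp only [Bool.not_false, Bool.true_and]
      set s : List Nat := PySem.Set.ofList (cs.filterMap pvCategory) with hset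
      have hmem : ∀ x : Nat, x ∈ s ↔ x ∈ cs.filterMap pvCategory := by
        rw [hset]; intro x; exact PySem.Set.mem_ofList _ _
      have hnz : (0 : Nat) ∉ s := by
        rw [hmem, pv_mem_zero]; simp [hns]
      have hrange : ∀ x ∈ s, x = 1 ∨ x = 2 ∨ x = 3 ∨ x = 4 := by
        intro x hx
        rcases pv_cat_range cs x ((hmem x).mp hx) with h | h | h | h | h
        · exact absurd (h ▸ hx) hnz
        all_goals simp [h]
      have hL := pv_len_eq s (by rw [hset]; exact PySem.Set.nodup_ofList _) hrange
      have m1 : ((1 : Nat) ∈ s) ↔ cs.any PySem.Chars.islower = true := by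
        rw [hmem]; exact pv_mem_one cs hns
      have m2 : ((2 : Nat) ∈ s) ↔ cs.any PySem.Chars.isupper = true := by
        rw [hmem]; exact pv_mem_two cs hns
      have m3 : ((3 : Nat) ∈ s) ↔ cs.any PySem.Chars.isdigit = true := by
        rw [hmem]; exact pv_mem_three cs hns
      have m4 : ((4 : Nat) ∈ s) ↔ cs.any (fun ch => !PySem.Chars.isalnum ch) = true := by
        rw [hmem]; exact pv_mem_four cs hns
      have hlen_s : PySem.Set.len s = (s.length : Int) := rfl
      by_cases b1 : cs.any PySem.Chars.islower = true <;>
        by_cases b2 : cs.any PySem.Chars.isupper = true <;>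
          by_cases b3 : cs.any PySem.Chars.isdigit = true <;>
            by_cases b4 : cs.any (fun ch => !PySem.Chars.isalnum ch) = true <;>
              all_goals
                (simp only [m1, m2, m3, m4] at hL
                 simp only [b1, b2, b3, b4, if_true] at hL
                 simp [b1, b2, b3, b4, hL, PySem.Set.len])
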